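-- pv_equiv track=rewrite | github.com/Aitocir/UnfoldingWorld | Pymug/server/game/parse.py | _split_out_colons
-- ===== SOURCE A (Python) =====
-- def _split_out_colons(terms):
--     newterms = []
--     for term in terms:
--         if ':' in term:
--             subterms = term.split(':')
--             for sub in subterms:
--                 newterms.append(sub)
--                 newterms.append(':')
--             newterms = newterms[:-1]
--         else:
--             newterms.append(term)
--     return [term for term in newterms if len(term)]
-- ===== SOURCE B (Python) =====
-- def _split_out_colons(terms):
--     # single character-level pass: emit tokens directly, never creating empty ones
--     out = []
--     for term in terms:
--         buf = ""
--         for ch in term: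
--             if ch == ':':
--                 if buf:
--                     out.append(buf)
--                     buf = ""
--                 out.append(':')
--             else:
--                 buf += ch
--         if buf:
--             out.append(buf)
--     return out
-- ===== Notes on version B (the rewrite author's own statement) =====
-- stated objective: alternative
-- what changed: Replaces split-on-colon plus re-interleaving ':' tokens, slicing off the trailing ':' and a final empty-string filter with a single character-level scan per term that emits non-empty buffer tokens and ':' tokens directly.
import Mathlib
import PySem

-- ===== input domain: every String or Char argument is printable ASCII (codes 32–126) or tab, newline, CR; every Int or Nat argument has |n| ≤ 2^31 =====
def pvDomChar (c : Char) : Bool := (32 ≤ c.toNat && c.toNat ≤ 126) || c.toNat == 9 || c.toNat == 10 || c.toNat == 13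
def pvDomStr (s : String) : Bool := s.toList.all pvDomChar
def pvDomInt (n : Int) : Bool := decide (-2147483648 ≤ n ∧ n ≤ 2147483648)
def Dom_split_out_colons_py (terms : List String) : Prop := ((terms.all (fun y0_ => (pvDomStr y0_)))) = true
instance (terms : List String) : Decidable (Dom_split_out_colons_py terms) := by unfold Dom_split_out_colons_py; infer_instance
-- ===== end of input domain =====

-- B replaces split/re-interleave/slice/final-filter with a single character-level scan per term
-- that emits non-empty buffer tokens and ':' tokens directly (alternative decomposition, same cost).


-- ===== PORT A =====
-- term.split(':') has the non-empty literal separator ':', so it never raises: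
-- it is PySem.Chars.splitOn on the character list (what PySem.Str.split? wraps in 'some').
def split_out_colons_py (terms : List String) : List String :=
  let newterms := terms.foldl (fun newterms term =>
    if PySem.Str.isIn ":" term then
      let subterms := (PySem.Chars.splitOn term.toList [':']).map String.ofList
      let newterms := subterms.foldl (fun nt sub => (nt ++ [sub]) ++ [":"]) newterms
      PySem.List.slice newterms none (some (-1))
    else newterms ++ [term]) []
  newterms.filter (fun t => decide (PySem.Str.len t ≠ 0))

-- ===== PORT B =====
-- one scan step of Source B's inner character loop: state = (tokens so far, current buffer)
def pvScanStep (p : List String × List Char) (ch : Char) : List String × List Char :=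
  if ch = ':' then
    ((if p.2 ≠ [] then p.1 ++ [String.ofList p.2] else p.1) ++ [":"], [])
  else (p.1, p.2 ++ [ch])

-- end-of-term flush of the buffer
def pvFlush (p : List String × List Char) : List String :=
  if p.2 ≠ [] then p.1 ++ [String.ofList p.2] else p.1

def split_out_colons_py_alt (terms : List String) : List String :=
  terms.foldl (fun out term => pvFlush (term.toList.foldl pvScanStep (out, []))) []

-- ===== PRECONDITION & SPEC =====
def Spec_split_out_colons_py (terms : List String) (out : List String) : Prop := out = split_out_colons_py_alt terms
instance (terms : List String) (out : List String) : Decidable (Spec_split_out_colons_py terms out) := by unfold Spec_split_out_colons_py; infer_instance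

-- ===== CLAIM (what is proved, stated in full; the proofs are below) =====
def Claim_equal_split_out_colons_py : Prop := ∀ (terms : List String), Dom_split_out_colons_py terms → Spec_split_out_colons_py terms (split_out_colons_py terms)

-- ===== LEMMAS AND PROOFS =====

-- simple structural splitter on ':' (forward buffer), used to characterise both ports
def pvSp : List Char → List Char → List (List Char)
  | [], cur => [cur]
  | c :: rest, cur => if c = ':' then cur :: pvSp rest [] else pvSp rest (cur ++ [c])

lemma pvSp_ne_nil (l cur : List Char) : pvSp l cur ≠ [] := by
  induction l generalizing cur with
  | nil => simp [pvSp]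
  | cons c rest ih => by_cases h : c = ':' <;> simp [pvSp, h, ih]

lemma pvSp_no_colon (l : List Char) (h : ':' ∉ l) : ∀ cur, pvSp l cur = [cur ++ l] := by
  induction l with
  | nil => intro cur; simp [pvSp]
  | cons c rest ih =>
      intro cur
      simp only [List.mem_cons, not_or] at h
      simp [pvSp, Ne.symm h.1, ih h.2]

lemma splitOn_go_eq (l : List Char) : ∀ (cur : List Char) (acc : List (List Char)) (fuel : Nat),
    l.length ≤ fuel →
    PySem.Chars.splitOn.go [':'] fuel l cur acc = acc.reverse ++ pvSp l cur.reverse := by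
  induction l with
  | nil =>
      intro cur acc fuel _
      cases fuel <;> simp [PySem.Chars.splitOn.go, pvSp]
  | cons c rest ih =>
      intro cur acc fuel hf
      cases fuel with
      | zero => simp at hf
      | succ fuel =>
          by_cases h : c = ':'
          · subst h
            have hpre : List.isPrefixOf [':'] (':' :: rest) = true := by
              simp [List.isPrefixOf]
            simp only [PySem.Chars.splitOn.go, hpre, if_true, List.drop_succ_cons,
              List.length_nil, List.drop_zero, List.length_cons] at *
            rw [ih [] (cur.reverse :: acc) fuel (by omega)]
            simp [pvSp]
          · have hpre : List.isPrefixOf [':'] (c :: rest) = false := by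
              simp [List.isPrefixOf, Ne.symm h]
            simp only [PySem.Chars.splitOn.go, hpre, Bool.false_eq_true, if_false,
              List.length_cons] at *
            rw [ih (c :: cur) acc fuel (by omega)]
            simp [pvSp, h]

lemma splitOn_eq_pvSp (l : List Char) : PySem.Chars.splitOn l [':'] = pvSp l [] := by
  rw [PySem.Chars.splitOn, splitOn_go_eq l [] [] (l.length + 1) (by omega)]
  simp

-- the token list both ports produce for a term suffix l with current buffer cur
def pvTok (l cur : List Char) : List String :=
  (((pvSp l cur).flatMap (fun p => [String.ofList p, ":"])).dropLast).filter (fun t => t ≠ "")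

lemma flatMap_pvSp_ne_nil (l cur : List Char) :
    (pvSp l cur).flatMap (fun p => [String.ofList p, ":"]) ≠ [] := by
  obtain ⟨p, ps, hps⟩ := List.exists_cons_of_ne_nil (pvSp_ne_nil l cur)
  simp [hps]

lemma pvTok_nil (cur : List Char) :
    pvTok [] cur = if cur ≠ [] then [String.ofList cur] else [] := by
  by_cases h : cur = []
  · simp [pvTok, pvSp, h]
  · have : String.ofList cur ≠ "" := by
      intro hc
      apply h
      have := congrArg String.toList hc
      simp at this; exact this
    simp [pvTok, pvSp, h, List.filter, this]

lemma pvTok_colon (rest cur : List Char) :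
    pvTok (':' :: rest) cur =
      (if cur ≠ [] then [String.ofList cur] else []) ++ ":" :: pvTok rest [] := by
  have hne := flatMap_pvSp_ne_nil rest []
  have hdrop :
      ((pvSp (':' :: rest) cur).flatMap (fun p => [String.ofList p, ":"])).dropLast
        = String.ofList cur :: ":" :: ((pvSp rest []).flatMap (fun p => [String.ofList p, ":"])).dropLast := by
    simp only [pvSp, if_true, List.flatMap_cons]
    rw [show ([String.ofList cur, ":"] ++ (pvSp rest []).flatMap (fun p => [String.ofList p, ":"]))
          = String.ofList cur :: ":" :: (pvSp rest []).flatMap (fun p => [String.ofList p, ":"]) from rfl]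
    rw [List.dropLast_cons_of_ne_nil (by simp [hne]),
        List.dropLast_cons_of_ne_nil hne]
  unfold pvTok
  rw [hdrop]
  by_cases h : cur = []
  · simp [h, List.filter]
  · have : String.ofList cur ≠ "" := by
      intro hc; apply h
      have := congrArg String.toList hc
      simp at this; exact this
    simp [h, List.filter, this]

lemma pvTok_other (c : Char) (rest cur : List Char) (h : c ≠ ':') :
    pvTok (c :: rest) cur = pvTok rest (cur ++ [c]) := by
  simp [pvTok, pvSp, h]

-- B's inner loop computes out ++ pvTok
lemma scan_eq_tok (l : List Char) : ∀ (out : List String) (buf : List Char),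
    pvFlush (l.foldl pvScanStep (out, buf)) = out ++ pvTok l buf := by
  induction l with
  | nil =>
      intro out buf
      by_cases h : buf = [] <;> simp [pvFlush, pvTok_nil, h]
  | cons c rest ih =>
      intro out buf
      by_cases h : c = ':'
      · subst h
        simp only [List.foldl_cons, pvScanStep, if_true]
        rw [ih, pvTok_colon]
        by_cases hb : buf = [] <;> simp [hb]
      · simp only [List.foldl_cons, pvScanStep, if_neg h]
        rw [ih, pvTok_other c rest buf h]

-- A's filter predicate is non-emptiness
lemma pred_eq (t : String) :
    (decide (PySem.Str.len t ≠ 0)) = (decide (t ≠ "")) := by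
  simp only [PySem.Str.len, decide_eq_decide]
  constructor
  · intro h hc; subst hc; simp at h
  · intro h hc
    apply h
    have : t.toList = [] := by
      have := List.length_eq_zero_iff.mp (by exact_mod_cast hc)
      exact this
    have h2 := congrArg String.ofList this
    simpa using h2
  
-- A's per-term contribution, before the final filter
def pvBlock (term : String) : List String :=
  if PySem.Str.isIn ":" term then
    (((pvSp term.toList []).flatMap (fun p => [String.ofList p, ":"])).dropLast)
  else [term]

lemma A_eq_flatMap (terms : List String) :
    split_out_colons_py terms = (terms.flatMap pvBlock).filter (fun t => t ≠ "") := by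
  unfold split_out_colons_py
  have hfold : ∀ acc, terms.foldl (fun newterms term =>
      if PySem.Str.isIn ":" term then
        PySem.List.slice
          (((PySem.Chars.splitOn term.toList [':']).map String.ofList).foldl
            (fun nt sub => (nt ++ [sub]) ++ [":"]) newterms) none (some (-1))
      else newterms ++ [term]) acc = acc ++ terms.flatMap pvBlock := by
    induction terms with
    | nil => intro acc; simp
    | cons t ts ih =>
        intro acc
        rw [List.foldl_cons, ih, List.flatMap_cons, ← List.append_assoc]
        congr 1
        by_cases h : PySem.Str.isIn ":" t
        · simp only [if_pos h, pvBlock, splitOn_eq_pvSp]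
          have hfold2 : ((pvSp t.toList []).map String.ofList).foldl
              (fun nt sub => (nt ++ [sub]) ++ [":"]) acc
              = acc ++ (pvSp t.toList []).flatMap (fun p => [String.ofList p, ":"]) := by
            rw [show (fun (nt : List String) sub => (nt ++ [sub]) ++ [":"])
                  = (fun nt sub => nt ++ [sub, ":"]) from by funext nt sub; simp]
            rw [PySem.List.foldl_append_eq_flatMap (fun sub => [sub, ":"])]
            simp [List.flatMap_map]
          rw [hfold2, PySem.List.slice_to_neg_one,
              List.dropLast_append_of_ne_nil (flatMap_pvSp_ne_nil t.toList [])]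
        · simp only [pvBlock, if_neg h]
  rw [hfold []]
  simp only [List.nil_append]
  congr 1
  funext t
  exact pred_eq t

lemma B_eq_flatMap (terms : List String) :
    split_out_colons_py_alt terms = terms.flatMap (fun t => pvTok t.toList []) := by
  unfold split_out_colons_py_alt
  have : ∀ acc, terms.foldl (fun out term => pvFlush (term.toList.foldl pvScanStep (out, []))) acc
      = acc ++ terms.flatMap (fun t => pvTok t.toList []) := by
    induction terms with
    | nil => intro acc; simp
    | cons t ts ih =>
        intro acc
        rw [List.foldl_cons, scan_eq_tok, ih, List.flatMap_cons, List.append_assoc]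
  rw [this []]
  simp

lemma block_filter_eq_tok (t : String) :
    (pvBlock t).filter (fun s => s ≠ "") = pvTok t.toList [] := by
  unfold pvBlock
  by_cases h : PySem.Str.isIn ":" t
  · rw [if_pos h]; rfl
  · have hmem : ':' ∉ t.toList := by
      have := PySem.Chars.isIn_eq_false_iff (sub := (":" : String).toList) (s := t.toList)
      have h2 : PySem.Chars.isIn (":" : String).toList t.toList = false := by
        simpa [PySem.Str.isIn] using (Bool.not_eq_true _).mp h
      have h3 := this.mp h2
      intro hc
      exact h3 ((List.singleton_infix_iff ':' t.toList).mpr (by simpa using hc))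
    rw [if_neg h, pvTok]
    rw [pvSp_no_colon t.toList hmem []]
    simp only [List.nil_append, List.flatMap_cons, List.flatMap_nil, List.append_nil]
    rw [show ([String.ofList t.toList, ":"] : List String).dropLast = [String.ofList t.toList] from rfl]
    simp

-- ===== VERDICT (by name: the statement is the Claim_ definition above) =====
theorem split_out_colons_py_spec : Claim_equal_split_out_colons_py := by
  intro terms _
  unfold Spec_split_out_colons_py
  rw [A_eq_flatMap, B_eq_flatMap, List.filter_flatMap]
  exact List.flatMap_congr (fun t _ => block_filter_eq_tok t)
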